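-- pv_equiv track=rewrite | github.com/kyr0/defuss | packages/apl/python/defuss_apl/runtime.py | _parse_template_chunks
-- ===== SOURCE A (Python) =====
-- from typing import Dict, List, Optional, Any, Callable, Union
--
-- def _parse_template_chunks(content: str) -> List[str]:
--     """Parse template content into executable chunks (lines or complete control blocks)"""
--     chunks = []
--     lines = content.split('\n')
--     i = 0
--
--     while i < len(lines):
--         line = lines[i].strip()
--
--         if not line:
--             i += 1
--             continue
--
--         # Check if this line starts a control block
--         if line.startswith('{% if ') or line.startswith('{%if '):
--             # Find the complete if/endif block
--             block_lines = [lines[i]]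
--             i += 1
--             if_depth = 1
--
--             while i < len(lines) and if_depth > 0:
--                 current_line = lines[i].strip()
--                 block_lines.append(lines[i])
--
--                 if current_line.startswith('{% if ') or current_line.startswith('{%if '):
--                     if_depth += 1
--                 elif current_line.startswith('{% endif') or current_line.startswith('{%endif'):
--                     if_depth -= 1
--
--                 i += 1
--
--             # Add the complete block as one chunk
--             chunks.append('\n'.join(block_lines))
--
--         elif line.startswith('{% for ') or line.startswith('{%for '):
--             # Find the complete for/endfor block
--             block_lines = [lines[i]]
--             i += 1
--             for_depth = 1
--
--             while i < len(lines) and for_depth > 0: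
--                 current_line = lines[i].strip()
--                 block_lines.append(lines[i])
--
--                 if current_line.startswith('{% for ') or current_line.startswith('{%for '):
--                     for_depth += 1
--                 elif current_line.startswith('{% endfor') or current_line.startswith('{%endfor'):
--                     for_depth -= 1
--
--                 i += 1
--
--             # Add the complete block as one chunk
--             chunks.append('\n'.join(block_lines))
--
--         else:
--             # Single line - add as individual chunk
--             chunks.append(lines[i])
--             i += 1
--
--     return chunks
-- ===== SOURCE B (Python) =====
-- def _parse_template_chunks(content: str) -> list:
--     """Parse template content into executable chunks (lines or complete control blocks)"""
--     chunks = []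
--     buffer = None       # lines of the currently open control block, or None
--     block_type = None   # 'if' or 'for' while a block is open
--     depth = 0
--     for raw in content.split('\n'):
--         stripped = raw.strip()
--         if buffer is None:
--             if not stripped:
--                 continue
--             if stripped.startswith('{% if ') or stripped.startswith('{%if '):
--                 buffer, block_type, depth = [raw], 'if', 1
--             elif stripped.startswith('{% for ') or stripped.startswith('{%for '):
--                 buffer, block_type, depth = [raw], 'for', 1
--             else:
--                 chunks.append(raw)
--         else:
--             buffer.append(raw)
--             if stripped.startswith('{% ' + block_type + ' ') or stripped.startswith('{%' + block_type + ' '):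
--                 depth += 1
--             elif stripped.startswith('{% end' + block_type) or stripped.startswith('{%end' + block_type):
--                 depth -= 1
--             if depth == 0:
--                 chunks.append('\n'.join(buffer))
--                 buffer = None
--     if buffer is not None:
--         chunks.append('\n'.join(buffer))
--     return chunks
-- ===== Notes on version B (the rewrite author's own statement) =====
-- stated objective: simpler
-- what changed: Replaces A's outer while with two duplicated inner block-collecting while-loops by one single pass over the lines driven by explicit state (open-block buffer, block type, depth), emitting any still-open buffer at EOF.
import Mathlib
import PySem

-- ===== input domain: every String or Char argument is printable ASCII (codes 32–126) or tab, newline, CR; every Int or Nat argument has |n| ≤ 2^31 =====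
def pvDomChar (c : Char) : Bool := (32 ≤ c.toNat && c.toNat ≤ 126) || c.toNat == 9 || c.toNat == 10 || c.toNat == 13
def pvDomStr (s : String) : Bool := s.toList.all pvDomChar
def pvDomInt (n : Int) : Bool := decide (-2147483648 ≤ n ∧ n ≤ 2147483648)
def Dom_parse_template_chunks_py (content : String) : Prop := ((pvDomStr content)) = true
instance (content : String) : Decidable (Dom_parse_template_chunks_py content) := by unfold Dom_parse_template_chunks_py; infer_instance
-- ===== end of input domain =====

-- B replaces A's nested while-loops (outer scan + inner block-collecting scan) by one
-- single pass over the lines driven by explicit state (open-block buffer, block type, depth);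
-- objective: simpler (one loop, no duplicated if/for collection code).

-- ===== PORT A =====
-- A's inner 'while i < len(lines) and depth > 0' collector; A has this code twice
-- (once for if, once for for), so the helper takes the four start-markers as parameters.
-- Called with depth > 0, as in A (depth starts at 1).
def pvACollect (op1 op2 cl1 cl2 : String) : List String → List String → Int → (List String × List String)
  | [], acc, _ => (acc, [])
  | l :: rest, acc, depth =>
    let s := PySem.Str.strip l
    let acc' := acc ++ [l]
    let depth' :=
      if PySem.Str.startswith s op1 || PySem.Str.startswith s op2 then depth + 1
      else if PySem.Str.startswith s cl1 || PySem.Str.startswith s cl2 then depth - 1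
      else depth
    if 0 < depth' then pvACollect op1 op2 cl1 cl2 rest acc' depth'
    else (acc', rest)

-- the remainder returned by the inner while is a suffix of its input (for termination of the outer loop)
theorem pvACollect_snd_length (op1 op2 cl1 cl2 : String) :
    ∀ (lines acc : List String) (depth : Int),
      (pvACollect op1 op2 cl1 cl2 lines acc depth).2.length ≤ lines.length := by
  intro lines
  induction lines with
  | nil => intro acc depth; simp [pvACollect]
  | cons l rest ih =>
    intro acc depth
    simp only [pvACollect]
    split_ifs <;> first
      | exact le_trans (ih _ _) (Nat.le_succ _)
      | simp

-- A's outer 'while i < len(lines)' loop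
def pvALoop : List String → List String
  | [] => []
  | l :: rest =>
    let s := PySem.Str.strip l
    if s = "" then pvALoop rest
    else if PySem.Str.startswith s "{% if " || PySem.Str.startswith s "{%if " then
      let r := pvACollect "{% if " "{%if " "{% endif" "{%endif" rest [l] 1
      PySem.Str.join "\n" r.1 :: pvALoop r.2
    else if PySem.Str.startswith s "{% for " || PySem.Str.startswith s "{%for " then
      let r := pvACollect "{% for " "{%for " "{% endfor" "{%endfor" rest [l] 1
      PySem.Str.join "\n" r.1 :: pvALoop r.2
    else l :: pvALoop rest
termination_by lines => lines.length
decreasing_by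
  · simp
  · exact Nat.lt_succ_of_le (pvACollect_snd_length _ _ _ _ _ _ _)
  · exact Nat.lt_succ_of_le (pvACollect_snd_length _ _ _ _ _ _ _)
  · simp

def parse_template_chunks_py (content : String) : List String :=
  pvALoop ((PySem.Chars.splitOn content.toList ['\n']).map String.ofList)

-- ===== PORT B =====
-- B's single for-loop with state: accumulated chunks and 'some (buffer, block_type, depth)'
-- while a control block is open, 'none' otherwise; at EOF an open buffer is emitted.
def pvBLoop : List String → List String → Option (List String × String × Int) → List String
  | [], chunks, none => chunks
  | [], chunks, some (buf, _, _) => chunks ++ [PySem.Str.join "\n" buf]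
  | raw :: rest, chunks, none =>
    let s := PySem.Str.strip raw
    if s = "" then pvBLoop rest chunks none
    else if PySem.Str.startswith s "{% if " || PySem.Str.startswith s "{%if " then
      pvBLoop rest chunks (some ([raw], "if", 1))
    else if PySem.Str.startswith s "{% for " || PySem.Str.startswith s "{%for " then
      pvBLoop rest chunks (some ([raw], "for", 1))
    else pvBLoop rest (chunks ++ [raw]) none
  | raw :: rest, chunks, some (buf, bt, depth) =>
    let s := PySem.Str.strip raw
    let buf' := buf ++ [raw]
    let depth' :=
      if PySem.Str.startswith s ("{% " ++ bt ++ " ") || PySem.Str.startswith s ("{%" ++ bt ++ " ") then depth + 1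
      else if PySem.Str.startswith s ("{% end" ++ bt) || PySem.Str.startswith s ("{%end" ++ bt) then depth - 1
      else depth
    if depth' = 0 then pvBLoop rest (chunks ++ [PySem.Str.join "\n" buf']) none
    else pvBLoop rest chunks (some (buf', bt, depth'))

def parse_template_chunks_py_alt (content : String) : List String :=
  pvBLoop ((PySem.Chars.splitOn content.toList ['\n']).map String.ofList) [] none

-- ===== PRECONDITION & SPEC =====
def Spec_parse_template_chunks_py (content : String) (out : List String) : Prop := out = parse_template_chunks_py_alt content
instance (content : String) (out : List String) : Decidable (Spec_parse_template_chunks_py content out) := by unfold Spec_parse_template_chunks_py; infer_instance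

-- ===== CLAIM (what is proved, stated in full; the proofs are below) =====
def Claim_equal_parse_template_chunks_py : Prop := ∀ (content : String), Dom_parse_template_chunks_py content → Spec_parse_template_chunks_py content (parse_template_chunks_py content)

-- ===== LEMMAS AND PROOFS =====
theorem pv_if1 : "{% " ++ "if" ++ " " = "{% if " := rfl
theorem pv_if2 : "{%" ++ "if" ++ " " = "{%if " := rfl
theorem pv_if3 : "{% end" ++ "if" = "{% endif" := rfl
theorem pv_if4 : "{%end" ++ "if" = "{%endif" := rfl
theorem pv_for1 : "{% " ++ "for" ++ " " = "{% for " := rfl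
theorem pv_for2 : "{%" ++ "for" ++ " " = "{%for " := rfl
theorem pv_for3 : "{% end" ++ "for" = "{% endfor" := rfl
theorem pv_for4 : "{%end" ++ "for" = "{%endfor" := rfl

-- while a block of the given kind is open, B's flat loop tracks A's inner collector
theorem pvCollect_eq (bt op1 op2 cl1 cl2 : String)
    (h1 : "{% " ++ bt ++ " " = op1) (h2 : "{%" ++ bt ++ " " = op2)
    (h3 : "{% end" ++ bt = cl1) (h4 : "{%end" ++ bt = cl2) :
    ∀ (lines acc : List String) (depth : Int) (chunks : List String),
      0 < depth →
      (∀ (ls : List String), ls.length ≤ lines.length → ∀ ch,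
          pvBLoop ls ch none = ch ++ pvALoop ls) →
      pvBLoop lines chunks (some (acc, bt, depth)) =
        chunks ++ (PySem.Str.join "\n" (pvACollect op1 op2 cl1 cl2 lines acc depth).1
                    :: pvALoop (pvACollect op1 op2 cl1 cl2 lines acc depth).2) := by
  intro lines
  induction lines with
  | nil =>
    intro acc depth chunks _ _
    simp [pvBLoop, pvACollect, pvALoop]
  | cons l rest ih =>
    intro acc depth chunks hd hrec
    simp only [pvBLoop, pvACollect, h1, h2, h3, h4]
    set s := PySem.Str.strip l with hs
    by_cases c1 : (PySem.Str.startswith s op1 || PySem.Str.startswith s op2) = true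
    · -- depth' = depth + 1 > 0
      simp only [c1, if_true]
      have hne : ¬ (depth + 1 = 0) := by omega
      have hpos : (0:Int) < depth + 1 := by omega
      simp only [if_neg hne, if_pos hpos]
      exact ih _ _ _ hpos (fun ls hls ch => hrec ls (le_trans hls (Nat.le_succ _)) ch)
    · by_cases c2 : (PySem.Str.startswith s cl1 || PySem.Str.startswith s cl2) = true
      · -- depth' = depth - 1
        simp only [c1, c2, if_false, if_true, Bool.false_eq_true]
        by_cases hz : depth - 1 = 0
        · have hnpos : ¬ (0:Int) < depth - 1 := by omega
          simp only [if_pos hz, if_neg hnpos]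
          rw [hrec rest (Nat.le_succ _) _]
          simp
        · have hpos : (0:Int) < depth - 1 := by omega
          simp only [if_neg hz, if_pos hpos]
          exact ih _ _ _ hpos (fun ls hls ch => hrec ls (le_trans hls (Nat.le_succ _)) ch)
      · -- depth' = depth
        simp only [c1, c2, if_false, Bool.false_eq_true]
        have hne : ¬ (depth = 0) := by omega
        simp only [if_neg hne, if_pos hd]
        exact ih _ _ _ hd (fun ls hls ch => hrec ls (le_trans hls (Nat.le_succ _)) ch)

-- the two passes agree line by line
theorem pvLoop_eq : ∀ (n : Nat) (lines : List String), lines.length ≤ n →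
    ∀ (chunks : List String), pvBLoop lines chunks none = chunks ++ pvALoop lines := by
  intro n
  induction n with
  | zero =>
    intro lines h chunks
    have : lines = [] := List.eq_nil_of_length_eq_zero (Nat.le_zero.mp h)
    subst this; simp [pvBLoop, pvALoop]
  | succ n ih =>
    intro lines h chunks
    match lines with
    | [] => simp [pvBLoop, pvALoop]
    | l :: rest =>
      have hr : rest.length ≤ n := Nat.le_of_succ_le_succ h
      simp only [pvBLoop, pvALoop]
      set s := PySem.Str.strip l with hs
      by_cases c0 : s = ""
      · simp only [c0]
        exact ih rest hr chunks
      · simp only [if_neg c0]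
        by_cases c1 : (PySem.Str.startswith s "{% if " || PySem.Str.startswith s "{%if ") = true
        · simp only [c1, if_true]
          exact pvCollect_eq "if" _ _ _ _ pv_if1 pv_if2 pv_if3 pv_if4 rest [l] 1 chunks
            (by norm_num) (fun ls hls ch => ih ls (le_trans hls hr) ch)
        · simp only [c1, if_false, Bool.false_eq_true]
          by_cases c2 : (PySem.Str.startswith s "{% for " || PySem.Str.startswith s "{%for ") = true
          · simp only [c2, if_true]
            exact pvCollect_eq "for" _ _ _ _ pv_for1 pv_for2 pv_for3 pv_for4 rest [l] 1 chunks
              (by norm_num) (fun ls hls ch => ih ls (le_trans hls hr) ch)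
          · simp only [c2, if_false, Bool.false_eq_true]
            rw [ih rest hr (chunks ++ [l])]
            simp

-- ===== VERDICT (by name: the statement is the Claim_ definition above) =====
theorem parse_template_chunks_py_spec : Claim_equal_parse_template_chunks_py := by
  intro content _
  unfold Spec_parse_template_chunks_py parse_template_chunks_py parse_template_chunks_py_alt
  rw [pvLoop_eq ((PySem.Chars.splitOn content.toList ['\n']).map String.ofList).length _ le_rfl []]
  simp
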